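-- pv_equiv track=rewrite | github.com/seal-research/OmniCode | gc/multivm_mig2.py | distribute_tasks_to_instances
-- ===== SOURCE A (Python) =====
-- from typing import List, Dict, Any, Optional
--
-- def distribute_tasks_to_instances(
--     instance_ids: List[str],
--     num_vms: int,
--     indices_to_run: Optional[List[int]] = None
-- ) -> Dict[str, List[str]]:
--     """Distribute tasks to VM instances."""
--     # Calculate how many instances each VM should handle
--     total_instances = len(instance_ids)
--     instances_per_vm = total_instances // num_vms
--     remainder = total_instances % num_vms
--
--     # Prepare task distribution
--     task_distribution = {}
--
--     for vm_index in range(num_vms):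
--         # Skip if not in indices_to_run
--         if indices_to_run is not None and vm_index not in indices_to_run:
--             continue
--
--         # Calculate the start and end indices for this VM
--         # Distribute any remainder instances to the first few VMs
--         start_index = vm_index * instances_per_vm + min(vm_index, remainder)
--         extra = 1 if vm_index < remainder else 0
--         end_index = start_index + instances_per_vm + extra
--
--         # Get the subset of instance IDs for this VM
--         vm_instance_ids = instance_ids[start_index:end_index]
--
--         # Add to task distribution
--         task_distribution[str(vm_index)] = vm_instance_ids
--
--     return task_distribution
-- ===== SOURCE B (Python) =====
-- def distribute_tasks_to_instances(instance_ids, num_vms, indices_to_run=None):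
--     """Distribute tasks to VM instances by computing, for each instance, which
--     VM owns it (inverse mapping), in a single pass over the instance ids."""
--     n = len(instance_ids)
--     instances_per_vm = n // num_vms
--     remainder = n % num_vms
--     buckets = {}
--     for vm_index in range(num_vms):
--         if indices_to_run is None or vm_index in indices_to_run:
--             buckets[vm_index] = []
--     big = remainder * (instances_per_vm + 1)  # ids owned by the first `remainder` VMs
--     for i, instance_id in enumerate(instance_ids):
--         if i < big:
--             owner = i // (instances_per_vm + 1)
--         else:
--             owner = remainder + (i - big) // instances_per_vm
--         if owner in buckets:
--             buckets[owner].append(instance_id)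
--     return {str(vm): ids for vm, ids in buckets.items()}
-- ===== Notes on version B (the rewrite author's own statement) =====
-- stated objective: alternative
-- what changed: Inverts the mapping: instead of slicing instance_ids per VM with closed-form start/end indices, B pre-creates empty buckets for the included VMs and makes one pass over the instance ids, computing each instance's owner VM from its position and appending it to that owner's bucket.
import Mathlib
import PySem

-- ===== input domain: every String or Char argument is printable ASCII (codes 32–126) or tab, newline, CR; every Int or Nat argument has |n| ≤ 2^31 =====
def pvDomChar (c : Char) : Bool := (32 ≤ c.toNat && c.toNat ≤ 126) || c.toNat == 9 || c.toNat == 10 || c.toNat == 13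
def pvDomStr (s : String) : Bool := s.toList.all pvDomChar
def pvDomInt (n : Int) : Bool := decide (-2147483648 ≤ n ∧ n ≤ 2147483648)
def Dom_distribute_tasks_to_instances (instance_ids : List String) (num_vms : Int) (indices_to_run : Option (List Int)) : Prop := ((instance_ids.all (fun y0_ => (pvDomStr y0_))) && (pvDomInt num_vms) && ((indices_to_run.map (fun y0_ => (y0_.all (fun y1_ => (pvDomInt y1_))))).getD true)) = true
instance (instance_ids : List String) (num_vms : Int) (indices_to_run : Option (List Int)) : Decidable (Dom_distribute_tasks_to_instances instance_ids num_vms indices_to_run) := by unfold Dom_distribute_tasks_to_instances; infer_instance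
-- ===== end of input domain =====

-- B inverts the mapping: instead of slicing instance_ids per VM with closed-form start/end
-- indices, it pre-creates buckets for the included VMs and makes one pass over the instance
-- ids, computing each instance's owner VM from its position (objective: alternative).

-- ===== PORT A =====
-- loop body of A's 'for vm_index in range(num_vms)' (condition order as in A)
def pvBodyA (instance_ids : List String) (indices_to_run : Option (List Int)) (instances_per_vm remainder : Int)
    (d : PySem.Dict String (List String)) (vm_index : Int) : PySem.Dict String (List String) :=
  if (match indices_to_run with
      | some l => decide (vm_index ∉ l)
      | none => false) = true then d
  else
    let start_index := vm_index * instances_per_vm + min vm_index remainder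
    let extra : Int := if vm_index < remainder then 1 else 0
    let end_index := start_index + instances_per_vm + extra
    let vm_instance_ids := PySem.List.slice instance_ids (some start_index) (some end_index)
    d.insert (PySem.Int.toStr vm_index) vm_instance_ids

def distribute_tasks_to_instances (instance_ids : List String) (num_vms : Int) (indices_to_run : Option (List Int)) : List (String × List String) :=
  let total_instances : Int := (instance_ids.length : Int)
  let instances_per_vm := PySem.Int.floordiv total_instances num_vms
  let remainder := PySem.Int.mod total_instances num_vms
  let task_distribution :=
    (PySem.List.pyRange 0 num_vms).foldl
      (pvBodyA instance_ids indices_to_run instances_per_vm remainder) PySem.Dict.empty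
  task_distribution.items

-- ===== PORT B =====
-- 'indices_to_run is None or vm_index in indices_to_run'
def pvIncl (indices_to_run : Option (List Int)) (v : Int) : Bool :=
  match indices_to_run with
  | none => true
  | some l => decide (v ∈ l)

-- owner VM of the instance at position i (B's inverse mapping)
def pvOwner (instances_per_vm remainder : Int) (i : Int) : Int :=
  if i < remainder * (instances_per_vm + 1) then PySem.Int.floordiv i (instances_per_vm + 1)
  else remainder + PySem.Int.floordiv (i - remainder * (instances_per_vm + 1)) instances_per_vm

-- body of B's first loop: create an empty bucket for each included VM
def pvMkBucket (indices_to_run : Option (List Int))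
    (d : PySem.Dict Int (List String)) (vm_index : Int) : PySem.Dict Int (List String) :=
  if pvIncl indices_to_run vm_index then d.insert vm_index [] else d

-- body of B's second loop: append the id to its owner's bucket if that bucket exists
def pvFill (instances_per_vm remainder : Int)
    (d : PySem.Dict Int (List String)) (p : Int × String) : PySem.Dict Int (List String) :=
  let owner := pvOwner instances_per_vm remainder p.1
  if d.contains owner then d.modify owner [] (fun ids => ids ++ [p.2]) else d

def distribute_tasks_to_instances_alt (instance_ids : List String) (num_vms : Int) (indices_to_run : Option (List Int)) : List (String × List String) :=
  let n : Int := (instance_ids.length : Int)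
  let instances_per_vm := PySem.Int.floordiv n num_vms
  let remainder := PySem.Int.mod n num_vms
  let buckets := (PySem.List.pyRange 0 num_vms).foldl (pvMkBucket indices_to_run) PySem.Dict.empty
  let filled := (PySem.List.enumerate instance_ids).foldl (pvFill instances_per_vm remainder) buckets
  (filled.items.foldl (fun d p => d.insert (PySem.Int.toStr p.1) p.2) PySem.Dict.empty).items

-- ===== PRECONDITION & SPEC =====
-- A raises ZeroDivisionError when num_vms == 0 (len(instance_ids) // num_vms); exactly those inputs are excluded.
def Pre_distribute_tasks_to_instances (instance_ids : List String) (num_vms : Int) (indices_to_run : Option (List Int)) : Prop := num_vms ≠ 0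
instance (instance_ids : List String) (num_vms : Int) (indices_to_run : Option (List Int)) : Decidable (Pre_distribute_tasks_to_instances instance_ids num_vms indices_to_run) := by unfold Pre_distribute_tasks_to_instances; infer_instance

def pvWitness_distribute_tasks_to_instances : List String × Int × Option (List Int) := (["a", "b", "c"], 2, some [0, 1])

def Spec_distribute_tasks_to_instances (instance_ids : List String) (num_vms : Int) (indices_to_run : Option (List Int)) (out : List (String × List String)) : Prop := out = distribute_tasks_to_instances_alt instance_ids num_vms indices_to_run
instance (instance_ids : List String) (num_vms : Int) (indices_to_run : Option (List Int)) (out : List (String × List String)) : Decidable (Spec_distribute_tasks_to_instances instance_ids num_vms indices_to_run out) := by unfold Spec_distribute_tasks_to_instances; infer_instance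

-- ===== CLAIM (what is proved, stated in full; the proofs are below) =====
def Claim_equal_distribute_tasks_to_instances : Prop := ∀ (instance_ids : List String) (num_vms : Int) (indices_to_run : Option (List Int)), Dom_distribute_tasks_to_instances instance_ids num_vms indices_to_run → Pre_distribute_tasks_to_instances instance_ids num_vms indices_to_run → Spec_distribute_tasks_to_instances instance_ids num_vms indices_to_run (distribute_tasks_to_instances instance_ids num_vms indices_to_run)

-- ===== LEMMAS AND PROOFS =====

-- A's loop body, rephrased with the positive inclusion test
lemma pvBodyA_eq (instance_ids : List String) (indices_to_run : Option (List Int)) (ipv rem : Int)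
    (d : PySem.Dict String (List String)) (v : Int) :
    pvBodyA instance_ids indices_to_run ipv rem d v =
      if pvIncl indices_to_run v then
        d.insert (PySem.Int.toStr v)
          (PySem.List.slice instance_ids (some (v * ipv + min v rem))
            (some (v * ipv + min v rem + ipv + (if v < rem then 1 else 0))))
      else d := by
  rcases indices_to_run with _ | l
  · simp [pvBodyA, pvIncl]
  · by_cases h : v ∈ l <;> simp [pvBodyA, pvIncl, h]

-- every bucket of B's first loop is empty
lemma pvBuckets_getD (l : List Int) (indices_to_run : Option (List Int))
    (d : PySem.Dict Int (List String)) (h : ∀ k, d.getD k [] = []) (k : Int) :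
    (l.foldl (pvMkBucket indices_to_run) d).getD k [] = [] := by
  induction l generalizing d with
  | nil => exact h k
  | cons a t ih =>
      simp only [List.foldl_cons]
      apply ih
      intro k'
      unfold pvMkBucket
      split
      · rw [PySem.Dict.getD_insert]
        split <;> simp [h]
      · exact h k'

-- keys of B's first loop: exactly the included VMs, in order
lemma pvBuckets_keys (num_vms : Int) (indices_to_run : Option (List Int)) :
    ((PySem.List.pyRange 0 num_vms).foldl (pvMkBucket indices_to_run) PySem.Dict.empty).keys
      = (PySem.List.pyRange 0 num_vms).filter (pvIncl indices_to_run) := by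
  unfold pvMkBucket
  rw [PySem.List.foldl_if_eq_foldl_filter (pvIncl indices_to_run)
        (fun (d : PySem.Dict Int (List String)) v => d.insert v ([] : List String))
        (PySem.List.pyRange 0 num_vms) PySem.Dict.empty]
  rw [PySem.Dict.keys_foldl_insert _ (fun _ _ => ([] : List String))]
  simp only [PySem.Dict.keys_empty]
  have hnd : ((PySem.List.pyRange 0 num_vms).filter (pvIncl indices_to_run)).Nodup :=
    (PySem.List.nodup_pyRange_one 0 num_vms).filter _
  calc PySem.Set.update ([] : PySem.Set Int) ((PySem.List.pyRange 0 num_vms).filter (pvIncl indices_to_run))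
      = PySem.Set.ofList ((PySem.List.pyRange 0 num_vms).filter (pvIncl indices_to_run)) := rfl
    _ = _ := PySem.Set.ofList_eq_self_of_nodup _ hnd

-- invariant of B's fill loop: keys are unchanged and each existing bucket collects,
-- in order, the ids whose owner is that key
lemma pvFill_inv (ipv rem : Int) (l : List (Int × String)) (d : PySem.Dict Int (List String)) :
    ((l.foldl (pvFill ipv rem) d).keys = d.keys) ∧
    (∀ k, (l.foldl (pvFill ipv rem) d).getD k [] =
      if d.contains k then
        d.getD k [] ++ (l.filter (fun p => pvOwner ipv rem p.1 == k)).map Prod.snd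
      else d.getD k []) := by
  induction l generalizing d with
  | nil =>
      refine ⟨rfl, fun k => ?_⟩
      split <;> simp
  | cons a t ih =>
      simp only [List.foldl_cons]
      by_cases hc : d.contains (pvOwner ipv rem a.1)
      · have hstep : pvFill ipv rem d a
            = d.modify (pvOwner ipv rem a.1) [] (fun ids => ids ++ [a.2]) := by
          simp [pvFill, hc]
        set d' := d.modify (pvOwner ipv rem a.1) [] (fun ids => ids ++ [a.2]) with hd'
        have hkeys : d'.keys = d.keys := by
          rw [hd', PySem.Dict.keys_modify, PySem.Dict.keys_insert_of_contains _ _ hc]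
        have hcont : ∀ k, d'.contains k = d.contains k := by
          intro k
          rw [hd', PySem.Dict.contains_modify]
          by_cases hk : k = pvOwner ipv rem a.1
          · simp [hk, hc]
          · simp [hk]
        have hget : ∀ k, d'.getD k [] =
            if k = pvOwner ipv rem a.1 then d.getD k [] ++ [a.2] else d.getD k [] := by
          intro k
          rw [hd', PySem.Dict.getD_modify]
          split
          · next h => rw [h]
          · rfl
        obtain ⟨ihk, ihg⟩ := ih d'
        rw [hstep]
        refine ⟨ihk.trans hkeys, fun k => ?_⟩
        rw [ihg k, hcont k]
        by_cases hck : d.contains k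
        · rw [if_pos hck, if_pos hck, hget k]
          by_cases hk : k = pvOwner ipv rem a.1
          · have hbeq : (pvOwner ipv rem a.1 == k) = true := by simp [hk]
            simp only [List.filter_cons, hbeq, if_pos, List.map_cons]
            rw [if_pos hk]
            simp
          · have hbeq : (pvOwner ipv rem a.1 == k) = false := beq_eq_false_iff_ne.mpr (Ne.symm hk)
            simp only [List.filter_cons, hbeq, Bool.false_eq_true, if_false]
            rw [if_neg hk]
        · rw [if_neg hck, if_neg hck, hget k]
          have hk : k ≠ pvOwner ipv rem a.1 := fun h => by rw [h] at hck; exact hck hc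
          rw [if_neg hk]
      · have hstep : pvFill ipv rem d a = d := by simp [pvFill, hc]
        obtain ⟨ihk, ihg⟩ := ih d
        rw [hstep]
        refine ⟨ihk, fun k => ?_⟩
        rw [ihg k]
        by_cases hck : d.contains k
        · rw [if_pos hck, if_pos hck]
          have hbeq : (pvOwner ipv rem a.1 == k) = false := by
            refine beq_eq_false_iff_ne.mpr (fun h => ?_)
            rw [h] at hc; exact hc hck
          simp only [List.filter_cons, hbeq, Bool.false_eq_true, if_false]
        · rw [if_neg hck, if_neg hck]

-- the core arithmetic: on positions 0 ≤ i < n, B's owner function is v exactly on A's slice range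
lemma pvOwner_iff (n ipv rem v num : Int) (hnum : 0 < num) (hn : 0 ≤ n)
    (hipv : ipv = PySem.Int.floordiv n num) (hrem : rem = PySem.Int.mod n num)
    (hv0 : 0 ≤ v) (hv1 : v < num) (i : Int) (hi0 : 0 ≤ i) (hi1 : i < n) :
    (pvOwner ipv rem i = v ↔
      v * ipv + min v rem ≤ i ∧ i < v * ipv + min v rem + ipv + (if v < rem then 1 else 0)) := by
  have hipv0 : 0 ≤ ipv := hipv ▸ PySem.Int.floordiv_nonneg hn hnum.le
  have hrem0 : 0 ≤ rem := hrem ▸ PySem.Int.mod_nonneg n hnum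
  have hrem1 : rem < num := hrem ▸ PySem.Int.mod_lt n hnum
  have hsum : ipv * num + rem = n := by
    rw [hipv, hrem]; exact PySem.Int.floordiv_mul_add_mod n num
  unfold pvOwner
  by_cases hbig : i < rem * (ipv + 1)
  · rw [if_pos hbig, PySem.Int.floordiv_eq_iff_of_pos (by omega)]
    by_cases hvr : v < rem
    · rw [min_eq_left (by omega), if_pos hvr]
      constructor
      · rintro ⟨h1, h2⟩; constructor <;> nlinarith
      · rintro ⟨h1, h2⟩; constructor <;> nlinarith
    · rw [min_eq_right (by omega), if_neg hvr]
      constructor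
      · rintro ⟨h1, h2⟩; exfalso; nlinarith
      · rintro ⟨h1, h2⟩; exfalso; nlinarith
  · rw [if_neg hbig]
    have hig : rem * (ipv + 1) ≤ i := by omega
    have hipos : 0 < ipv := by nlinarith
    have hfd0 : 0 ≤ PySem.Int.floordiv (i - rem * (ipv + 1)) ipv :=
      PySem.Int.floordiv_nonneg (by omega) hipos.le
    by_cases hvr : v < rem
    · rw [min_eq_left (by omega), if_pos hvr]
      constructor
      · intro h; exfalso; omega
      · rintro ⟨h1, h2⟩; exfalso; nlinarith
    · rw [min_eq_right (by omega), if_neg hvr]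
      constructor
      · intro h
        have hfd : PySem.Int.floordiv (i - rem * (ipv + 1)) ipv = v - rem := by omega
        rw [PySem.Int.floordiv_eq_iff_of_pos hipos] at hfd
        constructor <;> nlinarith
      · rintro ⟨h1, h2⟩
        have hfd : PySem.Int.floordiv (i - rem * (ipv + 1)) ipv = v - rem := by
          rw [PySem.Int.floordiv_eq_iff_of_pos hipos]
          constructor <;> nlinarith
        omega

-- filtered-enumerate equals the slice, for an in-range VM v
lemma pvGroup_eq_slice (instance_ids : List String) (num v : Int) (hnum : 0 < num)
    (hv0 : 0 ≤ v) (hv1 : v < num) :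
    (((PySem.List.enumerate instance_ids).filter
        (fun p => pvOwner (PySem.Int.floordiv ((instance_ids.length : Int)) num)
                          (PySem.Int.mod ((instance_ids.length : Int)) num) p.1 == v)).map Prod.snd)
      = PySem.List.slice instance_ids
          (some (v * PySem.Int.floordiv ((instance_ids.length : Int)) num
                 + min v (PySem.Int.mod ((instance_ids.length : Int)) num)))
          (some (v * PySem.Int.floordiv ((instance_ids.length : Int)) num
                 + min v (PySem.Int.mod ((instance_ids.length : Int)) num)
                 + PySem.Int.floordiv ((instance_ids.length : Int)) num
                 + (if v < PySem.Int.mod ((instance_ids.length : Int)) num then 1 else 0))) := by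
  set n : Int := (instance_ids.length : Int) with hn
  set ipv := PySem.Int.floordiv n num with hipv
  set rem := PySem.Int.mod n num with hrem
  set start := v * ipv + min v rem with hstart
  set stop := v * ipv + min v rem + ipv + (if v < rem then 1 else 0) with hstop
  have hn0 : 0 ≤ n := by positivity
  have hipv0 : 0 ≤ ipv := PySem.Int.floordiv_nonneg hn0 hnum.le
  have hrem0 : 0 ≤ rem := PySem.Int.mod_nonneg n hnum
  have hrem1 : rem < num := PySem.Int.mod_lt n hnum
  have hsum : ipv * num + rem = n := PySem.Int.floordiv_mul_add_mod n num
  have hstart0 : 0 ≤ start := by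
    rw [hstart]
    have : 0 ≤ v * ipv := mul_nonneg hv0 hipv0
    rcases le_total v rem with h | h
    · rw [min_eq_left h]; omega
    · rw [min_eq_right h]; omega
  have hss : start ≤ stop := by rw [hstart, hstop]; split <;> omega
  have hstopn : stop ≤ n := by
    rw [hstop]
    by_cases hvr : v < rem
    · rw [min_eq_left (by omega), if_pos hvr]; nlinarith
    · rw [min_eq_right (by omega), if_neg hvr]; nlinarith
  have hstartn : start ≤ n := le_trans hss hstopn
  have hlen : PySem.List.len instance_ids = n := by simp [PySem.List.len, hn]
  rw [PySem.List.enumerate_eq_map_pyRange instance_ids ""]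
  rw [List.filter_map, List.map_map]
  have hcomp :
      ((fun p : Int × String => pvOwner ipv rem p.1 == v) ∘
        (fun j => (j, PySem.List.pyGetD instance_ids j ""))) =
      (fun j => pvOwner ipv rem j == v) := rfl
  rw [hcomp, hlen]
  have hfc : ∀ j ∈ PySem.List.pyRange 0 n,
      (pvOwner ipv rem j == v) = decide (start ≤ j ∧ j < stop) := by
    intro j hj
    obtain ⟨hj0, hj1⟩ := PySem.List.mem_pyRange_one.mp hj
    have := pvOwner_iff n ipv rem v num hnum hn0 hipv hrem hv0 hv1 j hj0 hj1
    rw [← hstart, ← hstop] at this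
    by_cases h : pvOwner ipv rem j = v
    · simp [h, this.mp h]
    · have h2 : ¬ (start ≤ j ∧ j < stop) := fun hx => h (this.mpr hx)
      simp [h, h2]
  rw [List.filter_congr hfc]
  rw [PySem.List.pyRange_one_append 0 start n hstart0 hstartn, List.filter_append]
  rw [PySem.List.pyRange_one_append start stop n hss hstopn, List.filter_append]
  have hf1 : (PySem.List.pyRange 0 start).filter (fun j => decide (start ≤ j ∧ j < stop)) = [] := by
    rw [List.filter_eq_nil_iff]
    intro j hj
    obtain ⟨_, hj1⟩ := PySem.List.mem_pyRange_one.mp hj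
    simp only [decide_eq_true_eq]
    omega
  have hf2 : (PySem.List.pyRange start stop).filter (fun j => decide (start ≤ j ∧ j < stop))
      = PySem.List.pyRange start stop := by
    rw [List.filter_eq_self]
    intro j hj
    obtain ⟨hj0, hj1⟩ := PySem.List.mem_pyRange_one.mp hj
    simp only [decide_eq_true_eq]
    omega
  have hf3 : (PySem.List.pyRange stop n).filter (fun j => decide (start ≤ j ∧ j < stop)) = [] := by
    rw [List.filter_eq_nil_iff]
    intro j hj
    obtain ⟨hj0, _⟩ := PySem.List.mem_pyRange_one.mp hj
    simp only [decide_eq_true_eq]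
    omega
  rw [hf1, hf2, hf3, List.nil_append, List.map_append, List.map_nil, List.append_nil]
  -- the middle segment mapped through indexing is take/drop
  have hdrop := PySem.List.map_pyGetD_pyRange' instance_ids "" (a := start) hstart0
  rw [PySem.List.pyRange_one_append start stop ((instance_ids.length : Int)) hss (by rw [← hn]; exact hstopn),
      List.map_append] at hdrop
  have hlenA : ((PySem.List.pyRange start stop).map
      (fun j => PySem.List.pyGetD instance_ids j "")).length = (stop - start).toNat := by
    rw [List.length_map, PySem.List.length_pyRange_one]
  have htake := congrArg (fun l => List.take (stop - start).toNat l) hdrop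
  simp only at htake
  rw [← hlenA, List.take_left] at htake
  have hmid : List.map (fun j => PySem.List.pyGetD instance_ids j "") (PySem.List.pyRange start stop)
      = List.take (stop - start).toNat (List.drop start.toNat instance_ids) := by
    rw [htake, hlenA]
  -- and so is the slice
  have h1 : start = ((start.toNat : Nat) : Int) := (Int.toNat_of_nonneg hstart0).symm
  have h2 : stop = ((stop.toNat : Nat) : Int) := (Int.toNat_of_nonneg (le_trans hstart0 hss)).symm
  have hslice : PySem.List.slice instance_ids (some start) (some stop)
      = List.take (stop.toNat - start.toNat) (List.drop start.toNat instance_ids) := by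
    conv_lhs => rw [h1, h2]
    exact PySem.List.slice_natCast instance_ids start.toNat stop.toNat
  have hfun : (Prod.snd ∘ fun j => (j, PySem.List.pyGetD instance_ids j ""))
      = (fun j => PySem.List.pyGetD instance_ids j "") := rfl
  rw [hfun, hmid, hslice]
  congr 1
  omega

-- for 0 < num_vms, B computes exactly A's dict
lemma pvB_dict_eq (instance_ids : List String) (num_vms : Int) (indices_to_run : Option (List Int))
    (hnum : 0 < num_vms) :
    distribute_tasks_to_instances_alt instance_ids num_vms indices_to_run
      = distribute_tasks_to_instances instance_ids num_vms indices_to_run := by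
  simp only [distribute_tasks_to_instances, distribute_tasks_to_instances_alt]
  set n : Int := (instance_ids.length : Int) with hn
  set ipv := PySem.Int.floordiv n num_vms with hipv
  set rem := PySem.Int.mod n num_vms with hrem
  set inc := (PySem.List.pyRange 0 num_vms).filter (pvIncl indices_to_run) with hinc
  have hnd : inc.Nodup := (PySem.List.nodup_pyRange_one 0 num_vms).filter _
  set buckets := (PySem.List.pyRange 0 num_vms).foldl (pvMkBucket indices_to_run) PySem.Dict.empty
    with hbuckets
  have hkeysB : buckets.keys = inc := pvBuckets_keys num_vms indices_to_run
  have hgetB : ∀ k, buckets.getD k [] = [] := fun k =>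
    pvBuckets_getD _ indices_to_run PySem.Dict.empty (fun k' => PySem.Dict.getD_empty k' []) k
  obtain ⟨hkeysF, hgetF⟩ := pvFill_inv ipv rem (PySem.List.enumerate instance_ids) buckets
  have hitems : ((PySem.List.enumerate instance_ids).foldl (pvFill ipv rem) buckets).items
      = inc.map (fun k => (k,
          ((PySem.List.enumerate instance_ids).filter
            (fun p => pvOwner ipv rem p.1 == k)).map Prod.snd)) := by
    rw [PySem.Dict.items_eq_map_keys _ (by rw [hkeysF, hkeysB]; exact hnd) ([] : List String)]
    rw [hkeysF, hkeysB]
    apply List.map_congr_left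
    intro k hk
    have hck : buckets.contains k = true :=
      (PySem.Dict.contains_iff_mem_keys buckets k).mpr (hkeysB ▸ hk)
    rw [hgetF k, if_pos hck, hgetB k, List.nil_append]
  rw [hitems, List.foldl_map]
  -- A's loop, rewritten with the positive test and filtered
  have hA : (PySem.List.pyRange 0 num_vms).foldl
        (pvBodyA instance_ids indices_to_run ipv rem) PySem.Dict.empty
      = inc.foldl (fun d v => d.insert (PySem.Int.toStr v)
          (PySem.List.slice instance_ids (some (v * ipv + min v rem))
            (some (v * ipv + min v rem + ipv + (if v < rem then 1 else 0))))) PySem.Dict.empty := by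
    have h1 := PySem.List.foldl_congr_mem (PySem.List.pyRange 0 num_vms)
      (pvBodyA instance_ids indices_to_run ipv rem)
      (fun d v => if pvIncl indices_to_run v then
          d.insert (PySem.Int.toStr v)
            (PySem.List.slice instance_ids (some (v * ipv + min v rem))
              (some (v * ipv + min v rem + ipv + (if v < rem then 1 else 0)))) else d)
      PySem.Dict.empty
      (fun acc x _ => pvBodyA_eq instance_ids indices_to_run ipv rem acc x)
    rw [h1, PySem.List.foldl_if_eq_foldl_filter (pvIncl indices_to_run)
        (fun (d : PySem.Dict String (List String)) v => d.insert (PySem.Int.toStr v)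
          (PySem.List.slice instance_ids (some (v * ipv + min v rem))
            (some (v * ipv + min v rem + ipv + (if v < rem then 1 else 0)))))
        (PySem.List.pyRange 0 num_vms) PySem.Dict.empty, ← hinc]
  rw [hA]
  apply congrArg PySem.Dict.items
  apply PySem.List.foldl_congr_mem
  intro acc v hv
  have hmem : v ∈ PySem.List.pyRange 0 num_vms := List.mem_of_mem_filter hv
  obtain ⟨hv0, hv1⟩ := PySem.List.mem_pyRange_one.mp hmem
  have hge := pvGroup_eq_slice instance_ids num_vms v hnum hv0 hv1
  rw [← hn, ← hipv, ← hrem] at hge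
  rw [hge]

-- ===== VERDICT (by name: the statement is the Claim_ definition above) =====
theorem distribute_tasks_to_instances_spec : Claim_equal_distribute_tasks_to_instances := by
  intro instance_ids num_vms indices_to_run _ hpre
  unfold Spec_distribute_tasks_to_instances
  by_cases hpos : 0 < num_vms
  · exact (pvB_dict_eq instance_ids num_vms indices_to_run hpos).symm
  · -- num_vms < 0: both loops over the empty range; B's fill loop never finds a bucket
    have hrange : PySem.List.pyRange 0 num_vms = [] :=
      PySem.List.pyRange_one_eq_nil (by omega)
    unfold distribute_tasks_to_instances distribute_tasks_to_instances_alt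
    simp only [hrange, List.foldl_nil]
    have hfill : ∀ (l : List (Int × String)),
        l.foldl (pvFill (PySem.Int.floordiv ((instance_ids.length : Int)) num_vms)
                        (PySem.Int.mod ((instance_ids.length : Int)) num_vms)) PySem.Dict.empty
          = PySem.Dict.empty := by
      intro l
      induction l with
      | nil => rfl
      | cons a t ih =>
          simp only [List.foldl_cons]
          rw [show pvFill _ _ PySem.Dict.empty a = PySem.Dict.empty by
            simp [pvFill, PySem.Dict.contains_empty]]
          exact ih
    rw [hfill]
    rfl
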